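-- pv_equiv track=rewrite | github.com/sparkythehuman/advent-of-code-2020 | 16/solution.py | _build_column_graph
-- ===== SOURCE A (Python) =====
-- def _build_column_graph(tickets):
--     graph = {}
--     for ticket in tickets:
--         for index, value in enumerate(ticket):
--             if graph.get(index):
--                 graph[index].append(value)
--             else:
--                 graph[index] = [value]
--     return graph
-- ===== SOURCE B (Python) =====
-- def _build_column_graph(tickets):
--     max_len = max((len(t) for t in tickets), default=0)
--     return {i: [t[i] for t in tickets if i < len(t)] for i in range(max_len)}
-- ===== Notes on version B (the rewrite author's own statement) =====
-- stated objective: idiomatic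
-- what changed: B builds the dict column-major with one comprehension per column index (0..max_len-1) instead of A's row-by-row loop that appends to or creates per-index lists via dict.get truthiness.
import Mathlib
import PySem

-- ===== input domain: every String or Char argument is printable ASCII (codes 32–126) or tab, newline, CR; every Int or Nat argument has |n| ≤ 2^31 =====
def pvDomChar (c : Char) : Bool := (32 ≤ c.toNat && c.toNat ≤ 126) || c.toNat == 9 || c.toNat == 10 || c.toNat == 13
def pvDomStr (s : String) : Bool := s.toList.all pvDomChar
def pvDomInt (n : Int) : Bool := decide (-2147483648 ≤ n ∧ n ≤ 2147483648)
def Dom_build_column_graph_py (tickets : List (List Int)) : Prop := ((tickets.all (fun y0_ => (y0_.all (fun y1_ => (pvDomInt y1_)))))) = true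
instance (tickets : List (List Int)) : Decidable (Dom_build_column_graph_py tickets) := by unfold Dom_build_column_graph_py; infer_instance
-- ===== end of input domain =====

-- B builds the column graph column-major (one column list per index up to the max ticket length)
-- instead of A's row-by-row dict appends; same return value, no speed claim.


-- ===== PORT A =====
-- one ticket: for index, value in enumerate(ticket): if graph.get(index): append else create
def pvStepTicket (g : PySem.Dict Int (List Int)) (t : List Int) : PySem.Dict Int (List Int) :=
  (PySem.List.enumerate t).foldl
    (fun g p =>
      if (g.get? p.1).getD [] ≠ [] then g.modify p.1 [] (fun l => l ++ [p.2])
      else g.insert p.1 [p.2])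
    g

def build_column_graph_py (tickets : List (List Int)) : List (Int × List Int) :=
  (tickets.foldl pvStepTicket PySem.Dict.empty).items

-- ===== PORT B =====
def build_column_graph_py_alt (tickets : List (List Int)) : List (Int × List Int) :=
  let maxLen := tickets.foldl (fun m t => max m t.length) 0
  (List.range maxLen).map (fun i : Nat => ((i : Int), tickets.filterMap (fun t => t[i]?)))

-- ===== PRECONDITION & SPEC =====
def Spec_build_column_graph_py (tickets : List (List Int)) (out : List (Int × List Int)) : Prop := out = build_column_graph_py_alt tickets
instance (tickets : List (List Int)) (out : List (Int × List Int)) : Decidable (Spec_build_column_graph_py tickets out) := by unfold Spec_build_column_graph_py; infer_instance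

-- ===== CLAIM (what is proved, stated in full; the proofs are below) =====
def Claim_equal_build_column_graph_py : Prop := ∀ (tickets : List (List Int)), Dom_build_column_graph_py tickets → Spec_build_column_graph_py tickets (build_column_graph_py tickets)

-- ===== LEMMAS AND PROOFS =====
-- the running max length and the column lists, as B computes them
def pvMx (us : List (List Int)) : Nat := us.foldl (fun m t => max m t.length) 0
def pvCol (us : List (List Int)) (i : Nat) : List Int := us.filterMap (fun t => t[i]?)
-- the dict A holds after some rows: keys 0..n-1 in order, values given by F
def pvState (n : Nat) (F : Nat → List Int) : PySem.Dict Int (List Int) :=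
  PySem.Dict.mk ((List.range n).map (fun i : Nat => ((i : Int), F i)))

lemma pv_find_range_map (n j : Nat) (F : Nat → List Int) :
    ((List.range n).map (fun i : Nat => ((i : Int), F i))).find? (fun p => p.1 == (j : Int))
      = if j < n then some ((j : Int), F j) else none := by
  induction n with
  | zero => simp
  | succ n ih =>
    rw [List.range_succ, List.map_append, List.find?_append, ih]
    by_cases h : j < n
    · simp [h, Nat.lt_succ_of_lt h]
    · by_cases h2 : j = n
      · subst h2; simp [h]
      · have h3 : ¬ j < n + 1 := by omega
        simp [h, h3]
        omega

lemma pv_get?_state (n j : Nat) (F : Nat → List Int) :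
    (pvState n F).get? (j : Int) = if j < n then some (F j) else none := by
  simp only [PySem.Dict.get?, pvState, pv_find_range_map]
  split <;> simp

lemma pv_contains_state (n j : Nat) (F : Nat → List Int) :
    (pvState n F).contains (j : Int) = decide (j < n) := by
  rw [PySem.Dict.contains_eq_isSome_get?, pv_get?_state]
  split <;> simp_all

lemma pv_insert_state_lt (n j : Nat) (F : Nat → List Int) (w : List Int) (h : j < n) :
    (pvState n F).insert (j : Int) w = pvState n (fun i => if i = j then w else F i) := by
  simp only [PySem.Dict.insert, pv_contains_state n j F, h, decide_true, if_true]
  simp only [pvState, PySem.Dict.items, List.map_map]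
  congr 1
  apply List.map_congr_left
  intro i _
  by_cases hij : i = j <;> simp [hij]

lemma pv_insert_state_eq (n : Nat) (F : Nat → List Int) (w : List Int) :
    (pvState n F).insert (n : Int) w = pvState (n + 1) (fun i => if i = n then w else F i) := by
  simp only [PySem.Dict.insert, pv_contains_state n n F, show ¬ n < n by omega, decide_false,
    Bool.false_eq_true, if_false]
  simp only [pvState, List.range_succ, List.map_append]
  have h1 : List.map (fun i : Nat => ((i : Int), if i = n then w else F i)) (List.range n)
      = List.map (fun i : Nat => ((i : Int), F i)) (List.range n) := by
    apply List.map_congr_left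
    intro i hi
    have : i ≠ n := by simp at hi; omega
    simp [this]
  rw [h1]
  simp

lemma pvState_congr (n : Nat) (G G' : Nat → List Int) (h : ∀ i, i < n → G i = G' i) :
    pvState n G = pvState n G' := by
  unfold pvState
  congr 1
  apply List.map_congr_left
  intro i hi
  simp only [List.mem_range] at hi
  simp [h i hi]

lemma pv_inner (t : List Int) : ∀ (j n : Nat) (F : Nat → List Int), j ≤ n →
    (∀ i, i < n → F i ≠ []) → (∀ i, n ≤ i → F i = []) →
    (PySem.List.enumerate t (j : Int)).foldl
      (fun g p =>
        if (g.get? p.1).getD [] ≠ [] then g.modify p.1 [] (fun l => l ++ [p.2])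
        else g.insert p.1 [p.2]) (pvState n F)
    = pvState (max n (j + t.length))
        (fun i => F i ++ (if j ≤ i then (t[i - j]?).toList else [])) := by
  induction t with
  | nil =>
    intro j n F hjn _ _
    rw [show (j : Int) = ((j : Nat) : Int) from rfl, PySem.List.enumerate_nil]
    simp only [List.foldl_nil, List.length_nil, Nat.add_zero, Nat.max_eq_left hjn]
    apply pvState_congr
    intro i _
    simp
  | cons v rest ih =>
    intro j n F hjn hne hz
    rw [PySem.List.enumerate_cons, List.foldl_cons]
    have hcast : (j : Int) + 1 = ((j + 1 : Nat) : Int) := by push_cast; ring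
    rcases Nat.lt_or_ge j n with hlt | hge
    · -- key j present, stored list nonempty: the append (modify) branch fires
      have hget : ((pvState n F).get? (j : Int)).getD [] = F j := by
        rw [pv_get?_state]; simp [hlt]
      rw [if_pos (by rw [hget]; exact hne j hlt)]
      rw [PySem.Dict.modify, PySem.Dict.getD_eq_get?_getD, hget,
        pv_insert_state_lt n j F (F j ++ [v]) hlt, hcast,
        ih (j + 1) n _ (by omega)
          (by
            intro i hi
            by_cases hij : i = j
            · simp [hij]
            · simp [hij, hne i hi])
          (by
            intro i hi
            have h3 : i ≠ j := by omega
            simp only [if_neg h3]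
            exact hz i hi)]
      have hmax : max n (j + 1 + rest.length) = max n (j + (v :: rest).length) := by
        simp [List.length_cons]; omega
      rw [hmax]
      apply pvState_congr
      intro i _
      by_cases hij : i = j
      · subst hij
        simp [show ¬ i + 1 ≤ i by omega, show i - i = 0 by omega]
      · rcases Nat.lt_or_ge i j with h2 | h2
        · simp [hij, show ¬ j + 1 ≤ i by omega, show ¬ j ≤ i by omega]
        · have hji : j + 1 ≤ i := by omega
          have hsub : i - j = (i - (j + 1)) + 1 := by omega
          simp [hij, hji, show j ≤ i from h2, hsub]
    · -- key j not yet in the dict: the create (insert) branch fires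
      have hj : j = n := by omega
      subst hj
      have hget : ((pvState j F).get? (j : Int)).getD [] = [] := by
        rw [pv_get?_state]; simp
      rw [if_neg (by rw [hget]; simp)]
      rw [pv_insert_state_eq j F [v], hcast,
        ih (j + 1) (j + 1) _ (by omega)
          (by
            intro i hi
            by_cases hij : i = j
            · simp [hij]
            · have hlt2 : i < j := by omega
              simp [hij, hne i hlt2])
          (by
            intro i hi
            have h3 : i ≠ j := by omega
            simp only [if_neg h3]
            exact hz i (by omega))]
      have hmax : max (j + 1) (j + 1 + rest.length) = max j (j + (v :: rest).length) := by
        simp [List.length_cons]; omega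
      rw [hmax]
      apply pvState_congr
      intro i _
      by_cases hij : i = j
      · subst hij
        simp [show ¬ i + 1 ≤ i by omega, show i - i = 0 by omega, hz i (by omega)]
      · rcases Nat.lt_or_ge i j with h2 | h2
        · simp [hij, show ¬ j + 1 ≤ i by omega, show ¬ j ≤ i by omega]
        · have hji : j + 1 ≤ i := by omega
          have hsub : i - j = (i - (j + 1)) + 1 := by omega
          simp [hij, hji, show j ≤ i from h2, hsub]

lemma pv_foldl_max (us : List (List Int)) : ∀ a : Nat,
    us.foldl (fun m t => max m t.length) a = max a (pvMx us) := by
  induction us with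
  | nil => intro a; simp [pvMx]
  | cons t us ih =>
    intro a
    simp only [pvMx, List.foldl_cons]
    rw [ih, ih (max 0 t.length)]
    simp only [pvMx]
    omega

lemma pv_le_mx (us : List (List Int)) (t : List Int) (ht : t ∈ us) : t.length ≤ pvMx us := by
  induction us with
  | nil => simp at ht
  | cons u us ih =>
    simp only [pvMx, List.foldl_cons]
    rw [pv_foldl_max]
    rcases List.mem_cons.mp ht with h | h
    · subst h; omega
    · have := ih h; simp only [pvMx] at this ⊢; omega

lemma pv_lt_mx_exists (us : List (List Int)) (i : Nat) (h : i < pvMx us) :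
    ∃ t ∈ us, i < t.length := by
  induction us with
  | nil => simp [pvMx] at h
  | cons u us ih =>
    simp only [pvMx, List.foldl_cons] at h
    rw [pv_foldl_max] at h
    rcases Nat.lt_or_ge i u.length with h2 | h2
    · exact ⟨u, List.mem_cons_self, h2⟩
    · have : i < pvMx us := by omega
      obtain ⟨t, ht, hlt⟩ := ih this
      exact ⟨t, List.mem_cons_of_mem _ ht, hlt⟩

lemma pv_col_ne (us : List (List Int)) (i : Nat) (h : i < pvMx us) : pvCol us i ≠ [] := by
  obtain ⟨t, ht, hlt⟩ := pv_lt_mx_exists us i h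
  have : t[i] ∈ pvCol us i := by
    rw [pvCol, List.mem_filterMap]
    exact ⟨t, ht, by simp [List.getElem?_eq_getElem hlt]⟩
  intro hnil
  rw [hnil] at this
  simp at this

lemma pv_col_nil (us : List (List Int)) (i : Nat) (h : pvMx us ≤ i) : pvCol us i = [] := by
  rw [pvCol, List.filterMap_eq_nil_iff]
  intro t ht
  have := pv_le_mx us t ht
  exact List.getElem?_eq_none (by omega)

lemma pv_outer (tickets : List (List Int)) : ∀ (us : List (List Int)),
    tickets.foldl pvStepTicket (pvState (pvMx us) (pvCol us))
      = pvState (pvMx (us ++ tickets)) (pvCol (us ++ tickets)) := by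
  induction tickets with
  | nil => intro us; simp
  | cons t ts ih =>
    intro us
    rw [List.foldl_cons]
    have hstep : pvStepTicket (pvState (pvMx us) (pvCol us)) t
        = pvState (pvMx (us ++ [t])) (pvCol (us ++ [t])) := by
      unfold pvStepTicket
      rw [show (0 : Int) = ((0 : Nat) : Int) by simp]
      rw [pv_inner t 0 (pvMx us) (pvCol us) (Nat.zero_le _) (pv_col_ne us) (fun i hi => pv_col_nil us i hi)]
      have hmx : pvMx (us ++ [t]) = max (pvMx us) (0 + t.length) := by
        rw [pvMx, List.foldl_append, pv_foldl_max]
        simp [pvMx]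
      rw [← hmx]
      apply pvState_congr
      intro i _
      simp only [pvCol, List.filterMap_append]
      cases h : t[i]? <;> simp [List.filterMap_cons, h]
    rw [hstep, ih (us ++ [t]), List.append_assoc]
    simp

-- ===== VERDICT (by name: the statement is the Claim_ definition above) =====
theorem build_column_graph_py_spec : Claim_equal_build_column_graph_py := by
  intro tickets _
  unfold Spec_build_column_graph_py
  have h0 : PySem.Dict.empty = pvState (pvMx []) (pvCol []) := by
    simp [pvState, pvMx, PySem.Dict.empty]
  rw [build_column_graph_py, h0, pv_outer tickets [], List.nil_append]
  rfl
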